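-- pv_equiv track=rewrite | github.com/marcosdanielsf/mottivme-workspace | sales/n8n-workspace/Fluxos n8n/N8N/n8n-mcp/scripts/normalize_names.py | map_to_model
-- ===== SOURCE A (Python) =====
-- def country_name_from_phone(e164: str) -> str:
--     if not e164:
--         return ""
--     if e164.startswith("+55"):
--         return "Brazil"
--     if e164.startswith("+1"):
--         return "United States"
--     return ""
--
-- def map_to_model(row: dict, model_cols: list[str]) -> dict:
--     out = {}
--     fn = row.get("Nome", "")
--     ln = row.get("Sobrenome", "")
--     email = row.get("Email", "")
--     phone = row.get("Telefone", "")
--     country = country_name_from_phone(phone)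
--     for col in model_cols:
--         if col == "firstName":
--             out[col] = fn
--         elif col == "lastName":
--             out[col] = ln
--         elif col == "emailAddress":
--             out[col] = email
--         elif col == "contactPhone":
--             out[col] = phone
--         elif col == "countryName":
--             out[col] = country
--         elif col == "linkedin" and "linkedin" in row:
--             out[col] = row.get("linkedin", "")
--         elif col == "linkedInProfileUrl" and "linkedInProfileUrl" in row:
--             out[col] = row.get("linkedInProfileUrl", "")
--         elif col in row:
--             out[col] = row.get(col, "")
--         else:
--             out[col] = ""
--     return out
-- ===== SOURCE B (Python) =====
-- def country_name_from_phone(e164: str) -> str: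
--     if not e164:
--         return ""
--     if e164.startswith("+55"):
--         return "Brazil"
--     if e164.startswith("+1"):
--         return "United States"
--     return ""
--
-- def map_to_model(row: dict, model_cols: list[str]) -> dict:
--     # stage 1: generic fill straight from the row
--     out = {col: row.get(col, "") for col in model_cols}
--     # stage 2: patch the five model-specific columns in place where requested
--     phone = row.get("Telefone", "")
--     for col, val in (("firstName", row.get("Nome", "")),
--                      ("lastName", row.get("Sobrenome", "")),
--                      ("emailAddress", row.get("Email", "")),
--                      ("contactPhone", phone),
--                      ("countryName", country_name_from_phone(phone))):
--         if col in out: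
--             out[col] = val
--     return out
-- ===== Notes on version B (the rewrite author's own statement) =====
-- stated objective: alternative
-- what changed: Instead of A's single pass whose nine-branch if/elif chain picks each value, B does two staged passes: a generic fill out[col] = row.get(col, '') over model_cols, then an in-place patch of the five model-specific columns (firstName, lastName, emailAddress, contactPhone, countryName) where present; the generic fill subsumes A's redundant linkedin/linkedInProfileUrl/'col in row'/else branches.
import Mathlib
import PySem

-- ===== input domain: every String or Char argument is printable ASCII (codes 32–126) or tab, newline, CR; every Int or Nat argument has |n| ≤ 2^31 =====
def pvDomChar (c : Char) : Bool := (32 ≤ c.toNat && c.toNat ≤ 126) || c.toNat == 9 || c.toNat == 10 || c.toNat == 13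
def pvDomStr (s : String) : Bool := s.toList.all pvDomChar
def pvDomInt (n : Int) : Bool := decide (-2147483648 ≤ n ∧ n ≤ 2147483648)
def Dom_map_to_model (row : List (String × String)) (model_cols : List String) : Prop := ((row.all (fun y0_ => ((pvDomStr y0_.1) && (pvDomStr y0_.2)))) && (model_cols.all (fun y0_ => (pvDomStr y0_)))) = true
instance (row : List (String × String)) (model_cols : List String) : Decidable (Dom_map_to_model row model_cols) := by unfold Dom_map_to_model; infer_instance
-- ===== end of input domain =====

-- B replaces A's single pass with a nine-branch chain by two staged passes: a generic fill
-- out[col] = row.get(col, "") over model_cols, then an in-place patch of the five model-specific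
-- columns where present (alternative decomposition, same cost).


-- ===== PORT A =====
def country_name_from_phone (e164 : String) : String :=
  if e164 = "" then ""
  else if PySem.Str.startswith e164 "+55" then "Brazil"
  else if PySem.Str.startswith e164 "+1" then "United States"
  else ""

def map_to_model (row : List (String × String)) (model_cols : List String) : List (String × String) :=
  let rowd := PySem.Dict.mk row
  let fn := rowd.getD "Nome" ""
  let ln := rowd.getD "Sobrenome" ""
  let email := rowd.getD "Email" ""
  let phone := rowd.getD "Telefone" ""
  let country := country_name_from_phone phone
  let out := model_cols.foldl (fun (out : PySem.Dict String String) col =>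
    if col = "firstName" then out.insert col fn
    else if col = "lastName" then out.insert col ln
    else if col = "emailAddress" then out.insert col email
    else if col = "contactPhone" then out.insert col phone
    else if col = "countryName" then out.insert col country
    else if col = "linkedin" ∧ rowd.contains "linkedin" then out.insert col (rowd.getD "linkedin" "")
    else if col = "linkedInProfileUrl" ∧ rowd.contains "linkedInProfileUrl" then out.insert col (rowd.getD "linkedInProfileUrl" "")
    else if rowd.contains col then out.insert col (rowd.getD col "")
    else out.insert col "") PySem.Dict.empty
  out.items

-- ===== PORT B =====
def map_to_model_alt (row : List (String × String)) (model_cols : List String) : List (String × String) :=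
  let rowd := PySem.Dict.mk row
  -- stage 1: generic fill straight from the row
  let out0 := model_cols.foldl (fun (out : PySem.Dict String String) col =>
    out.insert col (rowd.getD col "")) PySem.Dict.empty
  -- stage 2: patch the five model-specific columns in place where requested
  let phone := rowd.getD "Telefone" ""
  let patches : List (String × String) :=
    [("firstName", rowd.getD "Nome" ""),
     ("lastName", rowd.getD "Sobrenome" ""),
     ("emailAddress", rowd.getD "Email" ""),
     ("contactPhone", phone),
     ("countryName", country_name_from_phone phone)]
  (patches.foldl (fun (out : PySem.Dict String String) p =>
    if out.contains p.1 then out.insert p.1 p.2 else out) out0).items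

-- ===== PRECONDITION & SPEC =====
def Spec_map_to_model (row : List (String × String)) (model_cols : List String) (out : List (String × String)) : Prop := out = map_to_model_alt row model_cols
instance (row : List (String × String)) (model_cols : List String) (out : List (String × String)) : Decidable (Spec_map_to_model row model_cols out) := by unfold Spec_map_to_model; infer_instance

-- ===== CLAIM (what is proved, stated in full; the proofs are below) =====
def Claim_equal_map_to_model : Prop := ∀ (row : List (String × String)) (model_cols : List String), Dom_map_to_model row model_cols → Spec_map_to_model row model_cols (map_to_model row model_cols)

-- ===== LEMMAS AND PROOFS =====

-- the per-column value A's chain assigns (depends on the column only, not the accumulator)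
def pvAval (rowd : PySem.Dict String String) (col : String) : String :=
  if col = "firstName" then rowd.getD "Nome" ""
  else if col = "lastName" then rowd.getD "Sobrenome" ""
  else if col = "emailAddress" then rowd.getD "Email" ""
  else if col = "contactPhone" then rowd.getD "Telefone" ""
  else if col = "countryName" then country_name_from_phone (rowd.getD "Telefone" "")
  else if col = "linkedin" ∧ rowd.contains "linkedin" then rowd.getD "linkedin" ""
  else if col = "linkedInProfileUrl" ∧ rowd.contains "linkedInProfileUrl" then rowd.getD "linkedInProfileUrl" ""
  else if rowd.contains col then rowd.getD col ""
  else ""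

theorem pvA_step_eq (rowd : PySem.Dict String String) :
    (fun (out : PySem.Dict String String) col =>
      if col = "firstName" then out.insert col (rowd.getD "Nome" "")
      else if col = "lastName" then out.insert col (rowd.getD "Sobrenome" "")
      else if col = "emailAddress" then out.insert col (rowd.getD "Email" "")
      else if col = "contactPhone" then out.insert col (rowd.getD "Telefone" "")
      else if col = "countryName" then out.insert col (country_name_from_phone (rowd.getD "Telefone" ""))
      else if col = "linkedin" ∧ rowd.contains "linkedin" then out.insert col (rowd.getD "linkedin" "")
      else if col = "linkedInProfileUrl" ∧ rowd.contains "linkedInProfileUrl" then out.insert col (rowd.getD "linkedInProfileUrl" "")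
      else if rowd.contains col then out.insert col (rowd.getD col "")
      else out.insert col "")
    = (fun (out : PySem.Dict String String) col => out.insert col (pvAval rowd col)) := by
  funext out col
  unfold pvAval
  split_ifs <;> rfl

-- getD of a fold of accumulator-independent inserts: the last (= any) insert at k wins
theorem pvGetD_foldl_insert (f : String → String) (cols : List String)
    (d : PySem.Dict String String) (k : String) :
    (cols.foldl (fun d c => d.insert c (f c)) d).getD k "" =
      if k ∈ cols then f k else d.getD k "" := by
  induction cols generalizing d with
  | nil => simp
  | cons c cs ih =>
    simp only [List.foldl_cons, ih, PySem.Dict.getD_insert, List.mem_cons]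
    by_cases hcs : k ∈ cs <;> by_cases hk : k = c <;> simp [hcs, hk]

-- the patch fold never changes the key list
theorem pvKeys_patch (ps : List (String × String)) (d : PySem.Dict String String) :
    (ps.foldl (fun d p => if d.contains p.1 then d.insert p.1 p.2 else d) d).keys = d.keys := by
  induction ps generalizing d with
  | nil => rfl
  | cons p ps ih =>
    simp only [List.foldl_cons]
    by_cases h : d.contains p.1
    · rw [if_pos h, ih, PySem.Dict.keys_insert_of_contains d p.2 h]
    · rw [if_neg h, ih]

-- getD through the patch fold, at a key no patch touches
theorem pvGetD_patch_of_ne (ps : List (String × String)) (k : String) :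
    ∀ d : PySem.Dict String String, (∀ p ∈ ps, p.1 ≠ k) →
    (ps.foldl (fun d p => if d.contains p.1 then d.insert p.1 p.2 else d) d).getD k "" =
      d.getD k "" := by
  induction ps with
  | nil => intro d _; rfl
  | cons p ps ih =>
    intro d h
    simp only [List.foldl_cons]
    have htail : ∀ q ∈ ps, q.1 ≠ k := fun q hq => h q (List.mem_cons_of_mem _ hq)
    have hk : k ≠ p.1 := fun he => h p (List.mem_cons_self ..) he.symm
    by_cases hc : d.contains p.1
    · rw [if_pos hc, ih _ htail, PySem.Dict.getD_insert_of_ne d p.2 "" hk]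
    · rw [if_neg hc, ih _ htail]

-- getD through the patch fold, at a patched key the dict contains: the patch value wins
theorem pvGetD_patch_of_mem (ps : List (String × String)) (k v : String) :
    ∀ d : PySem.Dict String String, (k, v) ∈ ps → (ps.map (·.1)).Nodup →
    d.contains k = true →
    (ps.foldl (fun d p => if d.contains p.1 then d.insert p.1 p.2 else d) d).getD k "" = v := by
  induction ps with
  | nil => intro d h _ _; cases h
  | cons p ps ih =>
    intro d hmem hnd hc
    simp only [List.map_cons, List.nodup_cons] at hnd
    simp only [List.foldl_cons]
    rcases List.mem_cons.mp hmem with h1 | h1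
    · subst h1
      rw [if_pos hc]
      have hne : ∀ q ∈ ps, q.1 ≠ k := fun q hq he =>
        hnd.1 (List.mem_map.mpr ⟨q, hq, he⟩)
      rw [pvGetD_patch_of_ne ps k _ hne, PySem.Dict.getD_insert_self]
    · have hkmap : k ∈ ps.map (·.1) := List.mem_map.mpr ⟨(k, v), h1, rfl⟩
      by_cases hcp : d.contains p.1
      · rw [if_pos hcp]
        exact ih _ h1 hnd.2 (by rw [PySem.Dict.contains_insert]; simp [hc])
      · rw [if_neg hcp]
        exact ih _ h1 hnd.2 hc

-- for every column, A's chain value equals B's "patch-else-generic" value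
theorem pvVal_eq (rowd : PySem.Dict String String) (k : String) :
    pvAval rowd k =
      (if k = "firstName" then some (rowd.getD "Nome" "")
       else if k = "lastName" then some (rowd.getD "Sobrenome" "")
       else if k = "emailAddress" then some (rowd.getD "Email" "")
       else if k = "contactPhone" then some (rowd.getD "Telefone" "")
       else if k = "countryName" then some (country_name_from_phone (rowd.getD "Telefone" ""))
       else none).getD (rowd.getD k "") := by
  unfold pvAval
  by_cases h1 : k = "firstName"; · simp [h1]
  by_cases h2 : k = "lastName"; · simp [h2]
  by_cases h3 : k = "emailAddress"; · simp [h3]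
  by_cases h4 : k = "contactPhone"; · simp [h4]
  by_cases h5 : k = "countryName"; · simp [h5]
  simp only [h1, h2, h3, h4, h5, if_false, Option.getD_none]
  by_cases h6 : k = "linkedin"
  · subst h6
    by_cases hc : (PySem.Dict.contains rowd "linkedin") = true
    · simp [hc]
    · simp [hc, PySem.Dict.getD_of_not_contains _ _ (by simpa using hc)]
  by_cases h7 : k = "linkedInProfileUrl"
  · subst h7
    by_cases hc : (PySem.Dict.contains rowd "linkedInProfileUrl") = true
    · simp [h6, hc]
    · simp [h6, hc, PySem.Dict.getD_of_not_contains _ _ (by simpa using hc)]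
  by_cases hc : (PySem.Dict.contains rowd k) = true
  · simp [h6, h7, hc]
  · simp [h6, h7, hc, PySem.Dict.getD_of_not_contains _ _ (by simpa using hc)]

-- core: A's one-pass fold and B's two staged folds produce the same items list
theorem pvMain (rowd : PySem.Dict String String) (model_cols : List String) :
    (model_cols.foldl (fun (d : PySem.Dict String String) c =>
       d.insert c (pvAval rowd c)) PySem.Dict.empty).items =
    (([("firstName", rowd.getD "Nome" ""),
       ("lastName", rowd.getD "Sobrenome" ""),
       ("emailAddress", rowd.getD "Email" ""),
       ("contactPhone", rowd.getD "Telefone" ""),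
       ("countryName", country_name_from_phone (rowd.getD "Telefone" ""))] :
        List (String × String)).foldl
      (fun (d : PySem.Dict String String) p =>
        if d.contains p.1 then d.insert p.1 p.2 else d)
      (model_cols.foldl (fun (d : PySem.Dict String String) c =>
        d.insert c (rowd.getD c "")) PySem.Dict.empty)).items := by
  set ps : List (String × String) :=
    [("firstName", rowd.getD "Nome" ""),
     ("lastName", rowd.getD "Sobrenome" ""),
     ("emailAddress", rowd.getD "Email" ""),
     ("contactPhone", rowd.getD "Telefone" ""),
     ("countryName", country_name_from_phone (rowd.getD "Telefone" ""))] with hps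
  set dA := model_cols.foldl (fun (d : PySem.Dict String String) c =>
    d.insert c (pvAval rowd c)) PySem.Dict.empty with hdA
  set dG := model_cols.foldl (fun (d : PySem.Dict String String) c =>
    d.insert c (rowd.getD c "")) PySem.Dict.empty with hdG
  set dB := ps.foldl (fun (d : PySem.Dict String String) p =>
    if d.contains p.1 then d.insert p.1 p.2 else d) dG with hdB
  have hkA : dA.keys = PySem.Set.update PySem.Dict.empty.keys model_cols :=
    PySem.Dict.keys_foldl_insert ..
  have hkG : dG.keys = PySem.Set.update PySem.Dict.empty.keys model_cols :=
    PySem.Dict.keys_foldl_insert ..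
  have hkB : dB.keys = dG.keys := pvKeys_patch ..
  have hndA : dA.keys.Nodup :=
    PySem.Dict.nodup_keys_foldl_insert _ _ _ PySem.Dict.nodup_keys_empty
  have hndG : dG.keys.Nodup :=
    PySem.Dict.nodup_keys_foldl_insert _ _ _ PySem.Dict.nodup_keys_empty
  have hndps : (ps.map (·.1)).Nodup := by
    have h : ps.map (·.1) =
        ["firstName", "lastName", "emailAddress", "contactPhone", "countryName"] := rfl
    rw [h]; decide
  rw [PySem.Dict.items_eq_map_keys dA hndA "",
    PySem.Dict.items_eq_map_keys dB (by rw [hkB]; exact hndG) "",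
    hkB, hkG, ← hkA]
  apply List.map_congr_left
  intro k hk
  have hkmem : k ∈ model_cols := by
    rw [hkA] at hk
    rcases (PySem.Set.mem_update _ _ _).mp hk with h | h
    · simp [PySem.Dict.keys_empty] at h
    · exact h
  have hAv : dA.getD k "" = pvAval rowd k := by
    rw [hdA, pvGetD_foldl_insert]; simp [hkmem]
  have hGv : dG.getD k "" = rowd.getD k "" := by
    rw [hdG, pvGetD_foldl_insert]; simp [hkmem]
  have hcG : dG.contains k = true := by
    rw [PySem.Dict.contains_iff_mem_keys, hkG]
    exact (PySem.Set.mem_update _ _ _).mpr (Or.inr hkmem)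
  have hBv : dB.getD k "" =
      (if k = "firstName" then some (rowd.getD "Nome" "")
       else if k = "lastName" then some (rowd.getD "Sobrenome" "")
       else if k = "emailAddress" then some (rowd.getD "Email" "")
       else if k = "contactPhone" then some (rowd.getD "Telefone" "")
       else if k = "countryName" then some (country_name_from_phone (rowd.getD "Telefone" ""))
       else none).getD (rowd.getD k "") := by
    by_cases h1 : k = "firstName"
    · subst h1
      rw [if_pos rfl, Option.getD_some]
      exact pvGetD_patch_of_mem ps _ _ dG (by simp [hps]) hndps hcG
    by_cases h2 : k = "lastName"
    · subst h2
      rw [if_neg (by decide), if_pos rfl, Option.getD_some]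
      exact pvGetD_patch_of_mem ps _ _ dG (by simp [hps]) hndps hcG
    by_cases h3 : k = "emailAddress"
    · subst h3
      rw [if_neg (by decide), if_neg (by decide), if_pos rfl, Option.getD_some]
      exact pvGetD_patch_of_mem ps _ _ dG (by simp [hps]) hndps hcG
    by_cases h4 : k = "contactPhone"
    · subst h4
      rw [if_neg (by decide), if_neg (by decide), if_neg (by decide), if_pos rfl,
        Option.getD_some]
      exact pvGetD_patch_of_mem ps _ _ dG (by simp [hps]) hndps hcG
    by_cases h5 : k = "countryName"
    · subst h5
      rw [if_neg (by decide), if_neg (by decide), if_neg (by decide), if_neg (by decide),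
        if_pos rfl, Option.getD_some]
      exact pvGetD_patch_of_mem ps _ _ dG (by simp [hps]) hndps hcG
    · have hne : ∀ p ∈ ps, p.1 ≠ k := by
        intro p hp
        simp only [hps, List.mem_cons, List.not_mem_nil, or_false] at hp
        rcases hp with h | h | h | h | h <;> subst h
        · exact fun he => h1 he.symm
        · exact fun he => h2 he.symm
        · exact fun he => h3 he.symm
        · exact fun he => h4 he.symm
        · exact fun he => h5 he.symm
      rw [if_neg h1, if_neg h2, if_neg h3, if_neg h4, if_neg h5, Option.getD_none,
        hdB, pvGetD_patch_of_ne ps k dG hne, hGv]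
  rw [hAv, hBv, pvVal_eq]

-- ===== VERDICT (by name: the statement is the Claim_ definition above) =====
theorem map_to_model_spec : Claim_equal_map_to_model := by
  intro row model_cols _
  unfold Spec_map_to_model
  dsimp only [map_to_model, map_to_model_alt]
  rw [pvA_step_eq (PySem.Dict.mk row)]
  exact pvMain (PySem.Dict.mk row) model_cols
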